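-- pv_equiv track=rewrite | github.com/shravyapendota/python-dsa | sum-stack.py | sum_using_stacks
-- ===== SOURCE A (Python) =====
-- def sum_using_stacks(num1, num2):
--     stack1 = list(map(int, str(num1)))
--     stack2 = list(map(int, str(num2)))
--
--     result_stack = []
--     carry = 0
--
--     while stack1 or stack2 or carry:
--         digit1 = stack1.pop() if stack1 else 0
--         digit2 = stack2.pop() if stack2 else 0
--
--         total = digit1 + digit2 + carry
--         result_stack.append(total % 10)
--         carry = total // 10
--
--     result = ""
--     while result_stack:
--         result += str(result_stack.pop())
--
--     return result
-- ===== SOURCE B (Python) =====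
-- def sum_using_stacks(num1, num2):
--     # closed form: for non-negative integers decimal addition of the digit
--     # stacks is just addition
--     return str(num1 + num2)
-- ===== Notes on version B (the rewrite author's own statement) =====
-- stated objective: simpler
-- what changed: Replaces the two digit stacks, the carry loop and the string-reassembly loop with the closed form str(num1 + num2).
import Mathlib
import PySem

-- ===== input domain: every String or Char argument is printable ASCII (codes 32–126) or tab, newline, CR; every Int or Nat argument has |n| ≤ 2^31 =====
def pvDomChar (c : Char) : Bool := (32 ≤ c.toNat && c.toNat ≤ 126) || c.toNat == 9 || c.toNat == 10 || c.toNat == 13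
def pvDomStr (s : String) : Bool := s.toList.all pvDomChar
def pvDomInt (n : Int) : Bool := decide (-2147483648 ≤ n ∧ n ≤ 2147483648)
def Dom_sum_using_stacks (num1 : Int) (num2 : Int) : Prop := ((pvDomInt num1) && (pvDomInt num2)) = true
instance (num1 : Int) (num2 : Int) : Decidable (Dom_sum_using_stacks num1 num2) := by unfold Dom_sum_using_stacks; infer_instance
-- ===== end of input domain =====

-- B replaces A's digit-stack carry loop by the closed form str(num1+num2); objective: simpler.

-- ===== PORT A =====
-- int(c) for a single character: exact on '0'..'9'; on any other character Python
-- raises ValueError (that happens only for a '-' sign, excluded by Pre_).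
def pvIntOfDigitChar (c : Char) : Int := (c.toNat : Int) - 48

-- stack1 = list(map(int, str(num1)))
def pvStack (num : Int) : List Int := (PySem.Int.toChars num).map pvIntOfDigitChar

-- while stack1 or stack2 or carry: … ; fuel = len(stack1)+len(stack2)+1 strictly
-- exceeds the number of iterations on digit stacks (carry stays ≤ 1), so the
-- fuel guard never fires on admitted inputs.
def pvSumLoop : Nat → List Int → List Int → Int → List Int → List Int
  | 0, _, _, _, res => res
  | fuel + 1, s1, s2, carry, res =>
    if s1 ≠ [] ∨ s2 ≠ [] ∨ carry ≠ 0 then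
      let d1 := s1.getLastD 0         -- stack1.pop() if stack1 else 0
      let d2 := s2.getLastD 0
      let total := d1 + d2 + carry
      pvSumLoop fuel s1.dropLast s2.dropLast (PySem.Int.floordiv total 10)
        (res ++ [PySem.Int.mod total 10])
    else res

-- while result_stack: result += str(result_stack.pop())  (popping the end =
-- walking the reversed list; the string is built as its character list)
def pvStrLoop : List Int → List Char → List Char
  | [], acc => acc
  | d :: rest, acc => pvStrLoop rest (acc ++ PySem.Int.toChars d)

def sum_using_stacks (num1 : Int) (num2 : Int) : String :=
  let stack1 := pvStack num1
  let stack2 := pvStack num2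
  let resultStack := pvSumLoop (stack1.length + stack2.length + 1) stack1 stack2 0 []
  String.ofList (pvStrLoop resultStack.reverse [])

-- ===== PORT B =====
def sum_using_stacks_alt (num1 : Int) (num2 : Int) : String :=
  PySem.Int.toStr (num1 + num2)

-- ===== PRECONDITION & SPEC =====
-- Pre_ excludes exactly the inputs where A raises ValueError: a negative argument
-- makes int('-') fail inside map(int, str(num)); B returns str(num1 + num2) there.
def Pre_sum_using_stacks (num1 : Int) (num2 : Int) : Prop := 0 ≤ num1 ∧ 0 ≤ num2
instance (num1 : Int) (num2 : Int) : Decidable (Pre_sum_using_stacks num1 num2) := by unfold Pre_sum_using_stacks; infer_instance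
def pvWitness_sum_using_stacks : Int × Int := (12, 345)

def Spec_sum_using_stacks (num1 : Int) (num2 : Int) (out : String) : Prop := out = sum_using_stacks_alt num1 num2
instance (num1 : Int) (num2 : Int) (out : String) : Decidable (Spec_sum_using_stacks num1 num2 out) := by unfold Spec_sum_using_stacks; infer_instance

-- ===== CLAIM (what is proved, stated in full; the proofs are below) =====
def Claim_equal_sum_using_stacks : Prop := ∀ (num1 : Int) (num2 : Int), Dom_sum_using_stacks num1 num2 → Pre_sum_using_stacks num1 num2 → Spec_sum_using_stacks num1 num2 (sum_using_stacks num1 num2)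

-- ===== LEMMAS AND PROOFS =====

-- most-significant-first digit list of a natural number ([] for 0)
def pvMsf (v : Nat) : List Int := ((Nat.digits 10 v).reverse).map Int.ofNat
-- least-significant-first digit list ([] for 0)
def pvLsf (v : Nat) : List Int := (Nat.digits 10 v).map Int.ofNat

lemma pvMsf_pos (v : Nat) (h : 0 < v) :
    pvMsf v = pvMsf (v / 10) ++ [((v % 10 : Nat) : Int)] := by
  unfold pvMsf
  rw [Nat.digits_def' (by norm_num : 1 < 10) h, List.reverse_cons, List.map_append]
  rfl

lemma pvMsf_eq_nil_iff (v : Nat) : pvMsf v = [] ↔ v = 0 := by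
  unfold pvMsf
  simp [Nat.digits_eq_nil_iff_eq_zero]

lemma pvMsf_getLastD (v : Nat) : (pvMsf v).getLastD 0 = ((v % 10 : Nat) : Int) := by
  rcases Nat.eq_zero_or_pos v with h | h
  · subst h; rfl
  · rw [pvMsf_pos v h]; simp

lemma pvMsf_dropLast (v : Nat) : (pvMsf v).dropLast = pvMsf (v / 10) := by
  rcases Nat.eq_zero_or_pos v with h | h
  · subst h; rfl
  · rw [pvMsf_pos v h]; simp

lemma pvMsf_length (v : Nat) (h : 0 < v) :
    (pvMsf v).length = (pvMsf (v / 10)).length + 1 := by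
  rw [pvMsf_pos v h]; simp

lemma pvLsf_pos (v : Nat) (h : 0 < v) :
    pvLsf v = ((v % 10 : Nat) : Int) :: pvLsf (v / 10) := by
  unfold pvLsf
  rw [Nat.digits_def' (by norm_num : 1 < 10) h]
  rfl

-- main loop invariant: on canonical digit stacks the carry loop emits exactly
-- the little-endian digits of a + b + c
lemma pvSumLoop_spec : ∀ (fuel : Nat) (a b c : Nat) (res : List Int), c ≤ 1 →
    (pvMsf a).length + (pvMsf b).length + (if c = 0 then 0 else 1) ≤ fuel →
    pvSumLoop fuel (pvMsf a) (pvMsf b) (c : Int) res = res ++ pvLsf (a + b + c) := by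
  intro fuel
  induction fuel with
  | zero =>
    intro a b c res hc hf
    have hc0 : c = 0 := by split_ifs at hf <;> omega
    have ha : (pvMsf a).length = 0 := by omega
    have hb : (pvMsf b).length = 0 := by omega
    rw [List.length_eq_zero_iff] at ha hb
    have ha0 : a = 0 := (pvMsf_eq_nil_iff a).mp ha
    have hb0 : b = 0 := (pvMsf_eq_nil_iff b).mp hb
    subst ha0; subst hb0; subst hc0
    simp [pvSumLoop, pvLsf]
  | succ fuel ih =>
    intro a b c res hc hf
    by_cases hz : a = 0 ∧ b = 0 ∧ c = 0
    · obtain ⟨ha, hb, hc0⟩ := hz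
      subst ha; subst hb; subst hc0
      simp [pvSumLoop, pvMsf, pvLsf]
    · have hcond : pvMsf a ≠ [] ∨ pvMsf b ≠ [] ∨ (c : Int) ≠ 0 := by
        by_cases ha : a = 0 <;> by_cases hb : b = 0
        · right; right
          have : c ≠ 0 := fun h => hz ⟨ha, hb, h⟩
          exact_mod_cast Int.natCast_ne_zero.mpr this
        · right; left; simp [pvMsf_eq_nil_iff, hb]
        · left; simp [pvMsf_eq_nil_iff, ha]
        · left; simp [pvMsf_eq_nil_iff, ha]
      rw [pvSumLoop, if_pos hcond]
      simp only [pvMsf_getLastD, pvMsf_dropLast]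
      have htot : ((a % 10 : Nat) : Int) + ((b % 10 : Nat) : Int) + (c : Int)
          = ((a % 10 + b % 10 + c : Nat) : Int) := by push_cast; ring
      set t : Nat := a % 10 + b % 10 + c with ht
      have hdiv : PySem.Int.floordiv ((t : Nat) : Int) 10 = ((t / 10 : Nat) : Int) := by
        exact_mod_cast PySem.Int.floordiv_natCast t 10
      have hmod : PySem.Int.mod ((t : Nat) : Int) 10 = ((t % 10 : Nat) : Int) := by
        exact_mod_cast PySem.Int.mod_natCast t 10
      rw [htot, hdiv, hmod]
      have hc' : t / 10 ≤ 1 := by omega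
      have hf' : (pvMsf (a / 10)).length + (pvMsf (b / 10)).length
          + (if t / 10 = 0 then 0 else 1) ≤ fuel := by
        by_cases ha : a = 0 <;> by_cases hb : b = 0
        · -- a = b = 0, c = 1
          have hc1 : c = 1 := by
            have : c ≠ 0 := fun h => hz ⟨ha, hb, h⟩
            omega
          subst ha; subst hb
          have : t / 10 = 0 := by omega
          simpa [pvMsf, this] using hf
        · have hbl := pvMsf_length b (by omega)
          have : t / 10 ≤ 1 := hc'
          subst ha
          simp only [pvMsf] at *
          split_ifs at hf ⊢ <;> simp_all [Nat.zero_div] <;> omega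
        · have hal := pvMsf_length a (by omega)
          subst hb
          split_ifs at hf ⊢ <;> simp_all [Nat.zero_div] <;> omega
        · have hal := pvMsf_length a (by omega)
          have hbl := pvMsf_length b (by omega)
          split_ifs at hf ⊢ <;> omega
      rw [ih (a / 10) (b / 10) (t / 10) _ hc' hf']
      have hpos : 0 < a + b + c := by omega
      rw [pvLsf_pos (a + b + c) hpos]
      have h1 : (a + b + c) % 10 = t % 10 := by omega
      have h2 : (a + b + c) / 10 = a / 10 + b / 10 + t / 10 := by omega
      rw [h1, h2]
      simp

-- Nat.toDigits 10 in terms of Nat.digits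
lemma pvToDigitsCore_spec : ∀ (f n : Nat) (acc : List Char), 0 < n → n ≤ f →
    Nat.toDigitsCore 10 f n acc = (Nat.digits 10 n).reverse.map Nat.digitChar ++ acc := by
  intro f
  induction f with
  | zero => intro n acc hn hf; omega
  | succ f ih =>
    intro n acc hn hf
    rw [Nat.toDigitsCore]
    by_cases h : n / 10 = 0
    · have hlt : n < 10 := by omega
      rw [Nat.digits_def' (by norm_num : 1 < 10) hn, h]
      simp [Nat.mod_eq_of_lt hlt]
    · rw [if_neg h, ih (n / 10) _ (by omega) (by omega)]
      rw [Nat.digits_def' (by norm_num : 1 < 10) hn]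
      simp

lemma pvToDigits10 (n : Nat) :
    Nat.toDigits 10 n = (if n = 0 then [0] else (Nat.digits 10 n).reverse).map Nat.digitChar := by
  by_cases h : n = 0
  · subst h; rfl
  · rw [if_neg h, Nat.toDigits]
    simpa using pvToDigitsCore_spec (n + 1) n [] (by omega) (by omega)

lemma pvIntOfDigitChar_digitChar (d : Nat) (h : d < 10) :
    pvIntOfDigitChar (Nat.digitChar d) = (d : Int) := by
  interval_cases d <;> decide

lemma pvToChars_digit (d : Nat) (h : d < 10) :
    PySem.Int.toChars (Int.ofNat d) = [Nat.digitChar d] := by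
  interval_cases d <;> decide

-- the input stack of a non-negative number is its canonical digit stack
lemma pvStack_eq (num : Int) (h : 0 ≤ num) :
    pvStack num = if num.toNat = 0 then [Int.ofNat 0] else pvMsf num.toNat := by
  unfold pvStack
  rw [PySem.Int.toChars, if_neg (by omega)]
  rw [pvToDigits10]
  by_cases h0 : num.toNat = 0
  · simp [h0, pvIntOfDigitChar_digitChar 0 (by norm_num)]
  · rw [if_neg h0, if_neg h0, List.map_map, pvMsf]
    apply List.map_congr_left
    intro d hd
    simp only [Function.comp]
    have : d < 10 := Nat.digits_lt_base (by norm_num) (List.mem_reverse.mp hd)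
    simp [pvIntOfDigitChar_digitChar d this]

lemma pvStrLoop_spec : ∀ (l : List Int) (acc : List Char),
    pvStrLoop l acc = acc ++ l.flatMap PySem.Int.toChars := by
  intro l
  induction l with
  | nil => intro acc; simp [pvStrLoop]
  | cons d rest ih => intro acc; rw [pvStrLoop, ih]; simp

lemma pvFlatMap_map (l : List Nat) (hl : ∀ k ∈ l, k < 10) :
    (l.map Int.ofNat).flatMap PySem.Int.toChars = l.map Nat.digitChar := by
  induction l with
  | nil => rfl
  | cons k rest ih =>
    have hk : k < 10 := hl k (List.mem_cons_self ..)
    simp only [List.map_cons, List.flatMap_cons]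
    rw [pvToChars_digit k hk, ih (fun x hx => hl x (List.mem_cons_of_mem _ hx))]
    rfl

-- flatten of the reversed emitted digits is exactly str(m+n)'s character list
lemma pvFlat_eq_toChars (s : Nat) (E : List Int)
    (hE : E = if s = 0 then [Int.ofNat 0] else pvLsf s) :
    (E.reverse).flatMap PySem.Int.toChars = PySem.Int.toChars (Int.ofNat s) := by
  subst hE
  by_cases h : s = 0
  · subst h; decide
  · have hchars : PySem.Int.toChars (Int.ofNat s)
        = ((Nat.digits 10 s).reverse).map Nat.digitChar := by
      rw [PySem.Int.toChars, if_neg (show ¬ ((Int.ofNat s) < 0) from Int.not_lt.mpr (Int.natCast_nonneg s)),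
        show (Int.ofNat s).toNat = s from rfl, pvToDigits10, if_neg h]
    rw [if_neg h, hchars]
    unfold pvLsf
    rw [← List.map_reverse, pvFlatMap_map]
    intro k hk
    exact Nat.digits_lt_base (by norm_num) (List.mem_reverse.mp hk)

-- one unfolding step of the carry loop
lemma pvSumLoop_succ (fuel : Nat) (s1 s2 : List Int) (carry : Int) (res : List Int) :
    pvSumLoop (fuel + 1) s1 s2 carry res =
      if s1 ≠ [] ∨ s2 ≠ [] ∨ carry ≠ 0 then
        pvSumLoop fuel s1.dropLast s2.dropLast
          (PySem.Int.floordiv (s1.getLastD 0 + s2.getLastD 0 + carry) 10)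
          (res ++ [PySem.Int.mod (s1.getLastD 0 + s2.getLastD 0 + carry) 10])
      else res := rfl

-- the carry loop on the two input stacks emits the digits of the sum
lemma pvRun (m n : Nat) :
    pvSumLoop ((if m = 0 then [Int.ofNat 0] else pvMsf m).length
        + (if n = 0 then [Int.ofNat 0] else pvMsf n).length + 1)
      (if m = 0 then [Int.ofNat 0] else pvMsf m)
      (if n = 0 then [Int.ofNat 0] else pvMsf n) 0 []
      = if m + n = 0 then [Int.ofNat 0] else pvLsf (m + n) := by
  by_cases hm : m = 0 <;> by_cases hn : n = 0
  · subst hm; subst hn; decide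
  · -- m = 0, n > 0
    subst hm
    rw [if_pos rfl, if_neg hn, if_neg (by omega)]
    rw [show ([Int.ofNat 0].length + (pvMsf n).length + 1) = ((pvMsf n).length + 1 + 1) from by
      simp; omega]
    rw [pvSumLoop_succ, if_pos (by left; simp)]
    rw [show ([Int.ofNat 0].getLastD 0) = Int.ofNat 0 from rfl,
      show ([Int.ofNat 0]).dropLast = ([] : List Int) from rfl,
      pvMsf_getLastD, pvMsf_dropLast]
    rw [show Int.ofNat 0 + ((n % 10 : Nat) : Int) + 0 = ((n % 10 : Nat) : Int) from by
      push_cast; ring]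
    have hdiv : PySem.Int.floordiv ((n % 10 : Nat) : Int) 10 = ((0 : Nat) : Int) := by
      have := PySem.Int.floordiv_natCast (n % 10) 10
      rw [show (n % 10) / 10 = 0 by omega] at this
      exact_mod_cast this
    have hmod : PySem.Int.mod ((n % 10 : Nat) : Int) 10 = ((n % 10 : Nat) : Int) := by
      have := PySem.Int.mod_natCast (n % 10) 10
      rw [show (n % 10) % 10 = n % 10 by omega] at this
      exact_mod_cast this
    rw [hdiv, hmod]
    show pvSumLoop ((pvMsf n).length + 1) (pvMsf 0) (pvMsf (n / 10)) (((0 : Nat) : Int))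
      ([] ++ [((n % 10 : Nat) : Int)]) = pvLsf (0 + n)
    rw [pvSumLoop_spec ((pvMsf n).length + 1) 0 (n / 10) 0 _ (by omega) (by
      rw [if_pos rfl, show (pvMsf 0).length = 0 from rfl]
      have := pvMsf_length n (by omega)
      omega)]
    rw [show (0 : Nat) + n / 10 + 0 = n / 10 by omega, Nat.zero_add, pvLsf_pos n (by omega)]
    simp
  · -- m > 0, n = 0
    subst hn
    rw [if_neg hm, if_pos rfl, if_neg (by omega)]
    rw [show ((pvMsf m).length + [Int.ofNat 0].length + 1) = ((pvMsf m).length + 1 + 1) from by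
      simp]
    rw [pvSumLoop_succ, if_pos (by right; left; simp)]
    rw [show ([Int.ofNat 0].getLastD 0) = Int.ofNat 0 from rfl,
      show ([Int.ofNat 0]).dropLast = ([] : List Int) from rfl,
      pvMsf_getLastD, pvMsf_dropLast]
    rw [show ((m % 10 : Nat) : Int) + Int.ofNat 0 + 0 = ((m % 10 : Nat) : Int) from by
      push_cast; ring]
    have hdiv : PySem.Int.floordiv ((m % 10 : Nat) : Int) 10 = ((0 : Nat) : Int) := by
      have := PySem.Int.floordiv_natCast (m % 10) 10
      rw [show (m % 10) / 10 = 0 by omega] at this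
      exact_mod_cast this
    have hmod : PySem.Int.mod ((m % 10 : Nat) : Int) 10 = ((m % 10 : Nat) : Int) := by
      have := PySem.Int.mod_natCast (m % 10) 10
      rw [show (m % 10) % 10 = m % 10 by omega] at this
      exact_mod_cast this
    rw [hdiv, hmod]
    show pvSumLoop ((pvMsf m).length + 1) (pvMsf (m / 10)) (pvMsf 0) (((0 : Nat) : Int))
      ([] ++ [((m % 10 : Nat) : Int)]) = pvLsf (m + 0)
    rw [pvSumLoop_spec ((pvMsf m).length + 1) (m / 10) 0 0 _ (by omega) (by
      rw [if_pos rfl, show (pvMsf 0).length = 0 from rfl]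
      have := pvMsf_length m (by omega)
      omega)]
    rw [show m / 10 + (0 : Nat) + 0 = m / 10 by omega, Nat.add_zero, pvLsf_pos m (by omega)]
    simp
  · -- m > 0, n > 0
    rw [if_neg hm, if_neg hn, if_neg (by omega)]
    show pvSumLoop ((pvMsf m).length + (pvMsf n).length + 1) (pvMsf m) (pvMsf n)
      (((0 : Nat) : Int)) [] = pvLsf (m + n)
    rw [pvSumLoop_spec ((pvMsf m).length + (pvMsf n).length + 1) m n 0 [] (by omega) (by simp)]
    rw [show m + n + 0 = m + n by omega]
    simp

-- ===== VERDICT (by name: the statement is the Claim_ definition above) =====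
theorem sum_using_stacks_spec : Claim_equal_sum_using_stacks := by
  intro num1 num2 _ hpre
  obtain ⟨h1, h2⟩ := hpre
  unfold Spec_sum_using_stacks sum_using_stacks sum_using_stacks_alt
  simp only [pvStack_eq num1 h1, pvStack_eq num2 h2]
  rw [pvRun num1.toNat num2.toNat, pvStrLoop_spec]
  rw [pvFlat_eq_toChars (num1.toNat + num2.toNat) _ rfl]
  rw [show Int.ofNat (num1.toNat + num2.toNat) = num1 + num2 from by
    rw [Int.ofNat_eq_natCast]; push_cast; omega]
  rw [PySem.Int.toStr, List.nil_append]
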